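-- pv_equiv track=rewrite | github.com/eunhee-dev/problem-solving | 0x0d_simulation/17135/solve.py | solve
-- ===== SOURCE A (Python) =====
-- from itertools import combinations
-- from collections import deque
--
-- DIRECTIONS = [(0, -1), (-1, 0), (0, 1)]
--
-- def get_nearest_enemy(board: list[list[int]], archer: int, d: int) -> tuple[int, int]:
--     n, m = len(board), len(board[0])
--     visited = [[False] * m for _ in range(n)]
--     visited[n - 1][archer] = True
--     queue = deque([(n - 1, archer)])
--
--     while queue and d > 0:
--         for _ in range(len(queue)):
--             x, y = queue.popleft()
--             if board[x][y] == 1: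
--                 return x, y
--             for dx, dy in DIRECTIONS:
--                 nx, ny = x + dx, y + dy
--                 if 0 <= nx < n and 0 <= ny < m and not visited[nx][ny]:
--                     visited[nx][ny] = True
--                     queue.append((nx, ny))
--         d -= 1
--
--     return -1, -1
--
-- def solve(d: int, board: list[list[int]]) -> int:
--     m = len(board[0])
--     max_removed = 0
--     total_enemy = sum(sum(row) for row in board)
--
--     for archer_comb in combinations(range(m), 3):
--         tmp_board = [row[::] for row in board]
--         curr_enemy = total_enemy
--         removed = 0
--
--         while curr_enemy > 0:
--             removed_enemy = {pos for archer in archer_comb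
--                              if (pos := get_nearest_enemy(tmp_board, archer, d)) != (-1, -1)}
--
--             for x, y in removed_enemy:
--                 tmp_board[x][y] = 0
--                 curr_enemy -= 1
--                 removed += 1
--
--             curr_enemy -= sum(tmp_board.pop())
--
--         max_removed = max(max_removed, removed)
--
--     return max_removed
-- ===== SOURCE B (Python) =====
-- def nearest(b, m, archer, d):
--     """Nearest enemy for one archer: minimize (Manhattan distance, column) over
--     cells equal to 1 within shooting range; None when there is no target."""
--     n = len(b)
--     best = None  # (dist, y, x)
--     for x, row in enumerate(b):
--         for y in range(m):
--             if row[y] == 1: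
--                 dist = (n - 1 - x) + abs(y - archer)
--                 if dist < d and (best is None or (dist, y) < (best[0], best[1])):
--                     best = (dist, y, x)
--     return None if best is None else (best[2], best[1])
--
--
-- def simulate(d, board, comb, total, m):
--     b = [row[:] for row in board]
--     curr = total
--     removed = 0
--     while curr > 0:
--         targets = set()
--         for a in comb:
--             t = nearest(b, m, a, d)
--             if t is not None:
--                 targets.add(t)
--         for x, y in targets:
--             b[x][y] = 0
--         removed += len(targets)
--         curr -= len(targets)
--         curr -= sum(b.pop())
--     return removed
--
--
-- def solve(d, board):
--     m = len(board[0])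
--     total = sum(map(sum, board))
--     best = 0
--     for i in range(m):
--         for j in range(i + 1, m):
--             for k in range(j + 1, m):
--                 best = max(best, simulate(d, board, (i, j, k), total, m))
--     return best
-- ===== Notes on version B (the rewrite author's own statement) =====
-- stated objective: simpler
-- what changed: Replaces the per-archer breadth-first search (deque + visited matrix, expanded level by level) with a direct one-pass scan over the board that picks the enemy minimizing (Manhattan distance, column), replaces the itertools.combinations generator with three nested index loops, and replaces the per-target counter mutation with arithmetic on the size of the target set.
-- outside the precondition, e.g. on solve(0, [[1, 0, 0], []]): A returns 0, B raises IndexError; on solve(1, []): A raises IndexError, B raises IndexError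
import Mathlib
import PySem

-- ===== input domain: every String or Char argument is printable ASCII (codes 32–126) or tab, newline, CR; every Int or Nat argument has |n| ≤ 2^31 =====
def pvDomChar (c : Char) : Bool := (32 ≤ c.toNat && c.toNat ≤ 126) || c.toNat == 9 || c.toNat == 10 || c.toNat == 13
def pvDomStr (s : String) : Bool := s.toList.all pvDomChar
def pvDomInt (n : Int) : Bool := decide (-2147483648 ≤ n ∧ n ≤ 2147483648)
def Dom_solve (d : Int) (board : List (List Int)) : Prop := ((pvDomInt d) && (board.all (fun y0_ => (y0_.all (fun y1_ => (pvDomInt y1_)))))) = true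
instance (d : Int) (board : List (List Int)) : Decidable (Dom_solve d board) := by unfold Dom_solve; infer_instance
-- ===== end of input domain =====

-- B replaces A's per-archer BFS by a direct scan minimizing (Manhattan distance, column) and
-- restructures the enumeration/counting; objective: simpler. Return-value equivalence only
-- (A mutates only its own local copies, so callers observe no side effects in either version).

-- ===== PORT A =====
-- board[x][y]; exact whenever 0 ≤ x < len(board) and 0 ≤ y < len(board[x]), which holds at
-- every access the admitted inputs reach (BFS probes only in-range cells).
def cellVal (b : List (List Int)) (x y : Int) : Int :=
  PySem.List.pyGetD (PySem.List.pyGetD b x []) y 0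

def DIRECTIONS : List (Int × Int) := [(0, -1), (-1, 0), (0, 1)]

-- 'if 0 <= nx < n and 0 <= ny < m and not visited[nx][ny]: visited[nx][ny] = True; queue.append(...)'
-- the visited matrix is modelled by its characteristic function
def pushNeighbor (n m : Int) (s : ((Int × Int) → Bool) × List (Int × Int)) (q : Int × Int) :
    ((Int × Int) → Bool) × List (Int × Int) :=
  if 0 ≤ q.1 ∧ q.1 < n ∧ 0 ≤ q.2 ∧ q.2 < m ∧ s.1 q = false then
    (fun p => if p = q then true else s.1 p, s.2 ++ [q])
  else s

-- 'for _ in range(len(queue))': process the current level's nodes, appended nodes form the next level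
def levelStep (b : List (List Int)) (n m : Int) :
    List (Int × Int) → ((Int × Int) → Bool) → List (Int × Int) →
    ((Int × Int) ⊕ (((Int × Int) → Bool) × List (Int × Int)))
  | [], vis, nxt => Sum.inr (vis, nxt)
  | (x, y) :: rest, vis, nxt =>
    if cellVal b x y = 1 then Sum.inl (x, y)
    else
      let s := DIRECTIONS.foldl (fun s dxy => pushNeighbor n m s (x + dxy.1, y + dxy.2)) (vis, nxt)
      levelStep b n m rest s.1 s.2

-- 'while queue and d > 0': fuel is d.toNat, one unit per level
def bfsLoop (b : List (List Int)) (n m : Int) :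
    Nat → List (Int × Int) → ((Int × Int) → Bool) → Int × Int
  | 0, _, _ => (-1, -1)
  | _ + 1, [], _ => (-1, -1)
  | fuel + 1, q, vis =>
    match levelStep b n m q vis [] with
    | Sum.inl p => p
    | Sum.inr s => bfsLoop b n m fuel s.2 s.1

def get_nearest_enemy (b : List (List Int)) (archer d : Int) : Int × Int :=
  let n : Int := (b.length : Int)
  let m : Int := ((b.headD []).length : Int)
  bfsLoop b n m d.toNat [(n - 1, archer)] (fun p => decide (p = (n - 1, archer)))

-- tmp_board[x][y] = 0 (x, y are in-range non-negative indices returned by the BFS)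
def setZero (b : List (List Int)) (x y : Int) : List (List Int) :=
  b.zipIdx.map (fun ri =>
    if (ri.2 : Int) = x then ri.1.zipIdx.map (fun vj => if (vj.2 : Int) = y then 0 else vj.1) else ri.1)

-- termination helpers for the 'while curr_enemy > 0' loop (the board loses one row per round)
theorem setZero_length (b : List (List Int)) (x y : Int) : (setZero b x y).length = b.length := by
  simp [setZero]

theorem length_foldl_remove :
    ∀ (l : List (Int × Int)) (t : List (List Int)) (c r : Int),
      ((l.foldl (fun (st : List (List Int) × Int × Int) q =>
        (setZero st.1 q.1 q.2, st.2.1 - 1, st.2.2 + 1)) (t, c, r)).1).length = t.length := by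
  intro l
  induction l with
  | nil => intro t c r; rfl
  | cons q l ih => intro t c r; simpa [setZero_length] using ih (setZero t q.1 q.2) (c - 1) (r + 1)

-- the 'while curr_enemy > 0' round loop; 'tmp ≠ []' is only a totality guard: Python keeps
-- curr = sum(tmp_board), so the loop body is never entered with an empty board
def roundsA (d : Int) (comb : List Int) (tmp : List (List Int)) (curr removed : Int) : Int :=
  if h : 0 < curr ∧ tmp ≠ [] then
    let targets : PySem.Set (Int × Int) :=
      comb.foldl (fun s archer =>
        let pos := get_nearest_enemy tmp archer d
        if pos ≠ (-1, -1) then PySem.Set.add s pos else s) PySem.Set.empty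
    let st := targets.foldl (fun (st : List (List Int) × Int × Int) q =>
        (setZero st.1 q.1 q.2, st.2.1 - 1, st.2.2 + 1)) (tmp, curr, removed)
    roundsA d comb st.1.dropLast (st.2.1 - (st.1.getLastD []).sum) st.2.2
  else removed
termination_by tmp.length
decreasing_by
  simp only [List.length_dropLast]
  rw [length_foldl_remove]
  have : tmp ≠ [] := h.2
  cases tmp with
  | nil => simp at this
  | cons _ _ => simp

def solve (d : Int) (board : List (List Int)) : Int :=
  let m : Int := ((board.headD []).length : Int)   -- board[0]: raises on [] (excluded by Pre_)
  let total : Int := (board.map (fun row => row.sum)).sum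
  -- 'for archer_comb in combinations(range(m), 3)'
  (PySem.List.combinations (PySem.List.pyRange 0 m 1) 3).foldl
    (fun mx comb => max mx (roundsA d comb (board.map (fun row => row)) total 0)) 0

-- ===== PORT B =====
-- '(dist, y) < (best[0], best[1])' — Python's lexicographic tuple comparison
def better (dist y : Int) (best : Option (Int × Int × Int)) : Bool :=
  match best with
  | none => true
  | some t => decide (dist < t.1 ∨ (dist = t.1 ∧ y < t.2.1))

-- direct scan: among cells == 1 within range, minimize (distance, column); None when no target
def nearestScan (b : List (List Int)) (m : Int) (archer d : Int) : Option (Int × Int) :=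
  let n : Int := (b.length : Int)
  let best : Option (Int × Int × Int) :=   -- (dist, y, x)
    (PySem.List.enumerate b).foldl (fun best xr =>
      (PySem.List.pyRange 0 m 1).foldl (fun (best : Option (Int × Int × Int)) y =>
        if PySem.List.pyGetD xr.2 y (0 : Int) = 1 then
          let dist := (n - 1 - xr.1) + |y - archer|
          if dist < d ∧ better dist y best = true then some (dist, y, xr.1) else best
        else best) best) none
  best.map (fun t => (t.2.2, t.2.1))

theorem length_foldl_setZero :
    ∀ (l : List (Int × Int)) (t : List (List Int)),
      (l.foldl (fun bb (q : Int × Int) => setZero bb q.1 q.2) t).length = t.length := by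
  intro l
  induction l with
  | nil => intro t; rfl
  | cons q l ih => intro t; simpa [setZero_length] using ih (setZero t q.1 q.2)

-- B's round loop: zero out the distinct targets, then count them once ('b ≠ []' totality guard as in A)
def roundsB (d m : Int) (comb : Int × Int × Int) (b : List (List Int)) (curr removed : Int) : Int :=
  if h : 0 < curr ∧ b ≠ [] then
    let targets : PySem.Set (Int × Int) :=
      [comb.1, comb.2.1, comb.2.2].foldl (fun s a =>
        match nearestScan b m a d with
        | some t => PySem.Set.add s t
        | none => s) PySem.Set.empty
    let b' := targets.foldl (fun bb (q : Int × Int) => setZero bb q.1 q.2) b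
    roundsB d m comb b'.dropLast
      (curr - (targets.length : Int) - (b'.getLastD []).sum) (removed + (targets.length : Int))
  else removed
termination_by b.length
decreasing_by
  simp only [List.length_dropLast]
  rw [length_foldl_setZero]
  have : b ≠ [] := h.2
  cases b with
  | nil => simp at this
  | cons _ _ => simp

def solve_alt (d : Int) (board : List (List Int)) : Int :=
  let m : Int := ((board.headD []).length : Int)
  let total : Int := (board.map (fun row => row.sum)).sum
  (PySem.List.pyRange 0 m 1).foldl (fun best i =>
    (PySem.List.pyRange (i + 1) m 1).foldl (fun best j =>
      (PySem.List.pyRange (j + 1) m 1).foldl (fun best k =>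
        max best (roundsB d m (i, j, k) (board.map (fun row => row)) total 0)) best) best) 0

-- ===== PRECONDITION & SPEC =====
-- Pre_ excludes the empty board (board[0] raises IndexError) and, when the first row has at least
-- 3 columns (so archer combinations exist), boards with a later row shorter than the first row,
-- on which A's BFS indexing board[x][y] can raise IndexError.
def Pre_solve (d : Int) (board : List (List Int)) : Prop :=
  board ≠ [] ∧ (3 ≤ (board.headD []).length →
    ∀ row ∈ board, (board.headD []).length ≤ row.length)
instance (d : Int) (board : List (List Int)) : Decidable (Pre_solve d board) := by
  unfold Pre_solve; infer_instance

def pvWitness_solve : Int × List (List Int) := (2, [[0, 1, 0], [1, 0, 1]])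

def Spec_solve (d : Int) (board : List (List Int)) (out : Int) : Prop := out = solve_alt d board
instance (d : Int) (board : List (List Int)) (out : Int) : Decidable (Spec_solve d board out) := by
  unfold Spec_solve; infer_instance

-- ===== CLAIM (what is proved, stated in full; the proofs are below) =====
def Claim_equal_solve : Prop := ∀ (d : Int) (board : List (List Int)),
  Dom_solve d board → Pre_solve d board → Spec_solve d board (solve d board)

-- ===== LEMMAS AND PROOFS =====

theorem witness_ok : Dom_solve pvWitness_solve.1 pvWitness_solve.2 ∧
    Pre_solve pvWitness_solve.1 pvWitness_solve.2 := by decide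

-- ---- geometry of the BFS: cells reachable in exactly k steps ----

-- |y - a| as a cast natAbs (omega-friendly)
def adI (y a : Int) : Int := ((y - a).natAbs : Int)

-- column y carries a cell at BFS distance k from (r, a)
abbrev colOK (r m a : Int) (k : Nat) (y : Int) : Prop :=
  0 ≤ y ∧ y < m ∧ adI y a ≤ (k : Int) ∧ (k : Int) - adI y a ≤ r

def cols (r m a : Int) (k : Nat) : List Int :=
  (PySem.List.pyRange (a - (k : Int)) (a + (k : Int) + 1) 1).filter
    (fun y => decide (colOK r m a k y))

def cellOf (r a : Int) (k : Nat) (y : Int) : Int × Int := (r - ((k : Int) - adI y a), y)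

def frontK (r m a : Int) (k : Nat) : List (Int × Int) := (cols r m a k).map (cellOf r a k)

def inG (r m : Int) (p : Int × Int) : Prop := 0 ≤ p.1 ∧ p.1 ≤ r ∧ 0 ≤ p.2 ∧ p.2 < m

def distTo (r a : Int) (p : Int × Int) : Int := (r - p.1) + adI p.2 a

theorem mem_cols {r m a : Int} {k : Nat} {y : Int} :
    y ∈ cols r m a k ↔ colOK r m a k y := by
  simp only [cols, List.mem_filter, PySem.List.mem_pyRange_one, decide_eq_true_eq]
  constructor
  · rintro ⟨-, h⟩; exact h
  · intro h
    refine ⟨?_, h⟩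
    rcases h with ⟨h1, h2, h3, h4⟩
    simp only [adI] at h3 h4
    omega

theorem pairwise_cols (r m a : Int) (k : Nat) : (cols r m a k).Pairwise (· < ·) := by
  exact List.Pairwise.filter _ (PySem.List.pairwise_lt_pyRange_one _ _)

theorem eq_of_pairwise_lt_of_mem_iff :
    ∀ {l₁ l₂ : List Int}, l₁.Pairwise (· < ·) → l₂.Pairwise (· < ·) →
      (∀ y, y ∈ l₁ ↔ y ∈ l₂) → l₁ = l₂ := by
  intro l₁
  induction l₁ with
  | nil =>
    intro l₂ _ _ hm
    cases l₂ with
    | nil => rfl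
    | cons x t => exact absurd ((hm x).2 List.mem_cons_self) (by simp)
  | cons x t ih =>
    intro l₂ h₁ h₂ hm
    cases l₂ with
    | nil => exact absurd ((hm x).1 List.mem_cons_self) (by simp)
    | cons z u =>
      have hx : x = z := by
        have hxz : x ∈ z :: u := (hm x).1 List.mem_cons_self
        have hzx : z ∈ x :: t := (hm z).2 List.mem_cons_self
        rcases List.mem_cons.1 hxz with h | h
        · exact h
        · rcases List.mem_cons.1 hzx with h' | h'
          · exact h'.symm
          · have := (List.pairwise_cons.1 h₂).1 x h
            have := (List.pairwise_cons.1 h₁).1 z h'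
            omega
      subst hx
      have : t = u := by
        apply ih (List.pairwise_cons.1 h₁).2 (List.pairwise_cons.1 h₂).2
        intro y
        constructor
        · intro hy
          have hlt := (List.pairwise_cons.1 h₁).1 y hy
          rcases List.mem_cons.1 ((hm y).1 (List.mem_cons_of_mem _ hy)) with h | h
          · omega
          · exact h
        · intro hy
          have hlt := (List.pairwise_cons.1 h₂).1 y hy
          rcases List.mem_cons.1 ((hm y).2 (List.mem_cons_of_mem _ hy)) with h | h
          · omega
          · exact h
      rw [this]

theorem mem_frontK {r m a : Int} {k : Nat} {p : Int × Int} :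
    p ∈ frontK r m a k ↔ (inG r m p ∧ distTo r a p = (k : Int)) := by
  simp only [frontK, List.mem_map, mem_cols]
  constructor
  · rintro ⟨y, hcol, rfl⟩
    rcases hcol with ⟨h1, h2, h3, h4⟩
    simp only [inG, distTo, cellOf, adI] at *
    omega
  · rintro ⟨hin, hd⟩
    refine ⟨p.2, ?_, ?_⟩
    · rcases hin with ⟨h1, h2, h3, h4⟩
      simp only [colOK, distTo, adI] at *
      omega
    · rcases hin with ⟨h1, h2, h3, h4⟩
      simp only [distTo, adI] at hd
      have hx : p.1 = r - ((k : Int) - adI p.2 a) := by simp only [adI]; omega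
      simp only [cellOf]
      exact Prod.ext_iff.2 ⟨hx.symm, rfl⟩

theorem frontK_pairwise_snd (r m a : Int) (k : Nat) :
    (frontK r m a k).Pairwise (fun p q => p.2 < q.2) := by
  apply List.Pairwise.map
  · intro x y (h : x < y); simpa [cellOf] using h
  · exact pairwise_cols r m a k

-- ---- the state invariant of one BFS level expansion ----

def SInv (r m a : Int) (k : Nat) (B : Int)
    (s : ((Int × Int) → Bool) × List (Int × Int)) : Prop :=
  (∀ p, s.1 p = true ↔
      (inG r m p ∧ (distTo r a p ≤ (k : Int) ∨ (distTo r a p = (k : Int) + 1 ∧ p.2 ≤ B)))) ∧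
  ∃ cs : List Int, s.2 = cs.map (cellOf r a (k + 1)) ∧ cs.Pairwise (· < ·) ∧
    ∀ y, y ∈ cs ↔ (colOK r m a (k + 1) y ∧ y ≤ B)

theorem colOK_inG_cellOf {r m a : Int} {k : Nat} {y : Int} (h : colOK r m a k y) :
    inG r m (cellOf r a k y) := by
  rcases h with ⟨h1, h2, h3, h4⟩
  simp only [inG, cellOf, adI] at *
  omega

theorem eq_cellOf_of_dist {r a : Int} {k : Nat} {p : Int × Int}
    (h : distTo r a p = (k : Int)) : p = cellOf r a k p.2 := by
  simp only [distTo, adI] at h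
  refine Prod.ext_iff.2 ⟨?_, rfl⟩
  simp only [cellOf, adI]; omega

theorem inG_dist_colOK {r m a : Int} {k : Nat} {p : Int × Int}
    (hin : inG r m p) (hd : distTo r a p = (k : Int)) : colOK r m a k p.2 := by
  rcases hin with ⟨h1, h2, h3, h4⟩
  simp only [distTo, adI] at hd
  simp only [colOK, adI]
  omega

theorem push_skip {r m a n : Int} {k : Nat} {B : Int} {s : ((Int × Int) → Bool) × List (Int × Int)}
    (hn : n = r + 1) (h : SInv r m a k B s) (q : Int × Int)
    (hq : inG r m q → (distTo r a q ≤ (k : Int) ∨ (distTo r a q = (k : Int) + 1 ∧ q.2 ≤ B))) :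
    pushNeighbor n m s q = s := by
  unfold pushNeighbor
  rw [if_neg]
  rintro ⟨h1, h2, h3, h4, h5⟩
  have hin : inG r m q := ⟨h1, by omega, h3, h4⟩
  have : s.1 q = true := (h.1 q).2 ⟨hin, hq hin⟩
  rw [this] at h5; exact absurd h5 (by simp)

theorem push_fresh {r m a n : Int} {k : Nat} {B : Int} {s : ((Int × Int) → Bool) × List (Int × Int)}
    (hn : n = r + 1) (h : SInv r m a k B s) (q : Int × Int)
    (hd : distTo r a q = (k : Int) + 1) (hB : B < q.2)
    (hgap : ∀ c, colOK r m a (k + 1) c → ¬(B < c ∧ c < q.2)) :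
    SInv r m a k q.2 (pushNeighbor n m s q) := by
  obtain ⟨hvis, cs, hcs2, hcsp, hcsm⟩ := h
  have hdq : distTo r a q = ((k + 1 : Nat) : Int) := by push_cast; omega
  have hq_cell : q = cellOf r a (k + 1) q.2 := eq_cellOf_of_dist hdq
  by_cases hin : inG r m q
  · have hvq : s.1 q = false := by
      cases hvq : s.1 q with
      | false => rfl
      | true =>
        exfalso
        rcases (hvis q).1 hvq with ⟨-, hca | ⟨-, hle⟩⟩ <;> omega
    obtain ⟨g1, g2, g3, g4⟩ := hin
    have hcond : 0 ≤ q.1 ∧ q.1 < n ∧ 0 ≤ q.2 ∧ q.2 < m ∧ s.1 q = false :=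
      ⟨g1, by omega, g3, g4, hvq⟩
    unfold pushNeighbor
    rw [if_pos hcond]
    constructor
    · intro p
      by_cases hp : p = q
      · subst hp
        exact iff_of_true (by simp) ⟨⟨g1, g2, g3, g4⟩, Or.inr ⟨hd, le_refl _⟩⟩
      · simp only [if_neg hp]
        rw [hvis p]
        constructor
        · rintro ⟨hing, hor | ⟨hde, hle⟩⟩
          · exact ⟨hing, Or.inl hor⟩
          · exact ⟨hing, Or.inr ⟨hde, by omega⟩⟩
        · rintro ⟨hing, hor | ⟨hde, hle⟩⟩
          · exact ⟨hing, Or.inl hor⟩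
          · refine ⟨hing, Or.inr ⟨hde, ?_⟩⟩
            by_contra hgt
            have hcol : colOK r m a (k + 1) p.2 :=
              inG_dist_colOK hing (by push_cast; omega)
            have := hgap p.2 hcol
            have hpq2 : p.2 = q.2 := by omega
            have : p = q := by
              rw [hq_cell]
              rw [eq_cellOf_of_dist (k := k + 1) (p := p) (by push_cast; omega), hpq2]
            exact hp this
    · refine ⟨cs ++ [q.2], ?_, ?_, ?_⟩
      · simp only [List.map_append, List.map_cons, List.map_nil, hcs2]
        rw [← hq_cell]
      · rw [List.pairwise_append]
        refine ⟨hcsp, List.pairwise_singleton _ _, ?_⟩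
        intro y hy y' hy'
        rcases List.mem_singleton.1 hy' with rfl
        have := (hcsm y).1 hy
        omega
      · intro y
        rw [List.mem_append, List.mem_singleton, hcsm y]
        constructor
        · rintro (⟨hcol, hle⟩ | rfl)
          · exact ⟨hcol, by omega⟩
          · refine ⟨?_, le_refl _⟩
            exact inG_dist_colOK ⟨g1, g2, g3, g4⟩ hdq
        · rintro ⟨hcol, hle⟩
          by_cases hyB : y ≤ B
          · exact Or.inl ⟨hcol, hyB⟩
          · have := hgap y hcol
            right; omega
  · have hpush : pushNeighbor n m s q = s := by
      unfold pushNeighbor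
      rw [if_neg]
      rintro ⟨c1, c2, c3, c4, -⟩
      exact hin ⟨c1, by omega, c3, c4⟩
    rw [hpush]
    constructor
    · intro p
      rw [hvis p]
      constructor
      · rintro ⟨hing, hor | ⟨hde, hle⟩⟩
        · exact ⟨hing, Or.inl hor⟩
        · exact ⟨hing, Or.inr ⟨hde, by omega⟩⟩
      · rintro ⟨hing, hor | ⟨hde, hle⟩⟩
        · exact ⟨hing, Or.inl hor⟩
        · refine ⟨hing, Or.inr ⟨hde, ?_⟩⟩
          by_contra hgt
          have hcol : colOK r m a (k + 1) p.2 :=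
            inG_dist_colOK hing (by push_cast; omega)
          have := hgap p.2 hcol
          have hpq2 : p.2 = q.2 := by omega
          have hpq : p = q := by
            rw [hq_cell]
            rw [eq_cellOf_of_dist (k := k + 1) (p := p) (by push_cast; omega), hpq2]
          exact hin (hpq ▸ hing)
    · refine ⟨cs, hcs2, hcsp, ?_⟩
      intro y
      rw [hcsm y]
      constructor
      · rintro ⟨hcol, hle⟩; exact ⟨hcol, by omega⟩
      · rintro ⟨hcol, hle⟩
        refine ⟨hcol, ?_⟩
        by_contra hgt
        have := hgap y hcol
        have hyq : y = q.2 := by omega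
        have : inG r m q := by
          rw [hq_cell]
          exact colOK_inG_cellOf (hyq ▸ hcol)
        exact hin this

-- ---- every (k+1)-column beyond the covered bound forces a k-column beyond prev ----
theorem noSkipCols {r m a prev B : Int} {k : Nat} (hr : 0 ≤ r) (hm : 0 ≤ a ∧ a < m)
    (hB : B = if prev < a then prev else prev + 1)
    {c : Int} (h1 : colOK r m a (k + 1) c) (hc : B < c) :
    ∃ c', colOK r m a k c' ∧ prev < c' ∧ c - 1 ≤ c' ∧ c' ≤ c + 1 ∧
      (c' = c + 1 → c + 1 ≤ a) ∧ (c' = c - 1 → a + 1 ≤ c) := by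
  have hBc : (prev < a ∧ B = prev) ∨ (a ≤ prev ∧ B = prev + 1) := by
    by_cases hpa : prev < a
    · left; exact ⟨hpa, by rw [hB, if_pos hpa]⟩
    · right; exact ⟨by omega, by rw [hB, if_neg hpa]⟩
  simp only [colOK, adI] at h1 ⊢
  by_cases hlt : c < a
  · by_cases hle : (((c - a).natAbs : Nat) : Int) ≤ (k : Int)
    · exact ⟨c, by omega, by omega, by omega, by omega, by omega, by omega⟩
    · exact ⟨c + 1, by omega, by omega, by omega, by omega, by omega, by omega⟩
  · by_cases hle : (((c - a).natAbs : Nat) : Int) ≤ (k : Int)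
    · exact ⟨c, by omega, by omega, by omega, by omega, by omega, by omega⟩
    · exact ⟨c - 1, by omega, by omega, by omega, by omega, by omega, by omega⟩

theorem levelStep_found (b : List (List Int)) (n m : Int) :
    ∀ (q : List (Int × Int)) (vis : (Int × Int) → Bool) (nxt : List (Int × Int)) (p : Int × Int),
      q.find? (fun c => decide (cellVal b c.1 c.2 = 1)) = some p →
      levelStep b n m q vis nxt = Sum.inl p := by
  intro q
  induction q with
  | nil => intro vis nxt p h; simp at h
  | cons hd tl ih =>
    intro vis nxt p h
    obtain ⟨x, y⟩ := hd
    by_cases he : cellVal b x y = 1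
    · rw [List.find?_cons_of_pos (by simpa using he)] at h
      cases h
      simp [levelStep, he]
    · rw [List.find?_cons_of_neg (by simpa using he)] at h
      simp only [levelStep, if_neg he]
      exact ih _ _ p h

theorem inner (b : List (List Int)) (r m a n : Int) (k : Nat)
    (hn : n = r + 1) (hr : 0 ≤ r) (ha : 0 ≤ a ∧ a < m) :
    ∀ (ys : List Int) (prev B : Int) (s : ((Int × Int) → Bool) × List (Int × Int)),
      (∀ y, y ∈ ys ↔ (colOK r m a k y ∧ prev < y)) → ys.Pairwise (· < ·) →
      (B = if prev < a then prev else prev + 1) →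
      SInv r m a k B s →
      (∀ y ∈ ys, cellVal b (cellOf r a k y).1 y ≠ 1) →
      ∃ vis', levelStep b n m (ys.map (cellOf r a k)) s.1 s.2 =
          Sum.inr (vis', frontK r m a (k + 1)) ∧
        ∀ p, vis' p = true ↔ (inG r m p ∧ distTo r a p ≤ (k : Int) + 1) := by
  intro ys
  induction ys with
  | nil =>
    intro prev B s hys hsort hB hS hne
    obtain ⟨hvis, cs, hcs2, hcsp, hcsm⟩ := hS
    have hcov : ∀ y, colOK r m a (k + 1) y → y ≤ B := by
      intro y hy
      by_contra hgt
      obtain ⟨c', hc1, hc2, -⟩ := noSkipCols hr ha hB hy (by omega)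
      exact absurd ((hys c').2 ⟨hc1, hc2⟩) (by simp)
    have hcols : cs = cols r m a (k + 1) := by
      apply eq_of_pairwise_lt_of_mem_iff hcsp (pairwise_cols r m a (k + 1))
      intro y
      rw [hcsm y, mem_cols]
      exact ⟨fun h => h.1, fun h => ⟨h, hcov y h⟩⟩
    refine ⟨s.1, ?_, ?_⟩
    · show Sum.inr (s.1, s.2) = _
      rw [hcs2, hcols]
      rfl
    · intro p
      rw [hvis p]
      constructor
      · rintro ⟨hin, hle | ⟨heq, -⟩⟩
        · exact ⟨hin, by omega⟩
        · exact ⟨hin, by omega⟩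
      · rintro ⟨hin, hle⟩
        by_cases hk : distTo r a p ≤ (k : Int)
        · exact ⟨hin, Or.inl hk⟩
        · have hde : distTo r a p = (k : Int) + 1 := by omega
          have hcol : colOK r m a (k + 1) p.2 := inG_dist_colOK hin (by push_cast; omega)
          exact ⟨hin, Or.inr ⟨hde, hcov p.2 hcol⟩⟩
  | cons y' tl ih =>
    intro prev B s hys hsort hB hS hne
    have hy'm : colOK r m a k y' ∧ prev < y' := (hys y').1 List.mem_cons_self
    have hcolY := hy'm.1
    have hcolY' := hy'm.1
    simp only [colOK, adI] at hcolY'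
    have hBc : (prev < a ∧ B = prev) ∨ (a ≤ prev ∧ B = prev + 1) := by
      by_cases hpa : prev < a
      · left; exact ⟨hpa, by rw [hB, if_pos hpa]⟩
      · right; exact ⟨by omega, by rw [hB, if_neg hpa]⟩
    have hprevY : prev < y' := hy'm.2
    -- each remaining column of the level forces y' as a lower bound
    have hmemge : ∀ c', colOK r m a k c' → prev < c' → y' ≤ c' := by
      intro c' h1 h2
      rcases List.mem_cons.1 ((hys c').2 ⟨h1, h2⟩) with rfl | hct
      · omega
      · exact le_of_lt ((List.pairwise_cons.1 hsort).1 c' hct)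
    -- the head cell
    set x₀ : Int := r - ((k : Int) - adI y' a) with hx₀
    -- L neighbour
    set B₁ : Int := if y' ≤ a then y' - 1 else B with hB₁
    have hS1 : SInv r m a k B₁ (pushNeighbor n m s (x₀, y' - 1)) := by
      by_cases hya : y' ≤ a
      · have hdL : distTo r a (x₀, y' - 1) = (k : Int) + 1 := by
          simp only [distTo, adI, hx₀]; omega
        have hBle : B ≤ y' - 1 := by omega
        rw [hB₁, if_pos hya]
        by_cases hBl : B < y' - 1
        · refine push_fresh hn hS _ hdL hBl ?_
          intro c hc ⟨u1, u2⟩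
          obtain ⟨c', hc1, hc2, hc3, hc4, -⟩ := noSkipCols hr ha hB hc u1
          have := hmemge c' hc1 hc2
          omega
        · have hBeq : B = y' - 1 := by omega
          rw [push_skip hn hS _ (fun _ => Or.inr ⟨hdL, by omega⟩)]
          rw [← hBeq]
          exact hS
      · have hdL : distTo r a (x₀, y' - 1) ≤ (k : Int) := by
          simp only [distTo, adI, hx₀]; omega
        rw [hB₁, if_neg hya]
        rw [push_skip hn hS _ (fun _ => Or.inl hdL)]
        exact hS
    -- U neighbour
    have hS2 : SInv r m a k y' (pushNeighbor n m (pushNeighbor n m s (x₀, y' - 1)) (x₀ - 1, y')) := by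
      have hdU : distTo r a (x₀ - 1, y') = (k : Int) + 1 := by
        simp only [distTo, adI, hx₀]; omega
      by_cases hBl : B₁ < y'
      · refine push_fresh hn hS1 _ hdU hBl ?_
        intro c hc ⟨u1, u2⟩
        by_cases hya : y' ≤ a
        · rw [hB₁, if_pos hya] at u1; omega
        · rw [hB₁, if_neg hya] at u1
          obtain ⟨c', hc1, hc2, hc3, hc4, hc5, -⟩ := noSkipCols hr ha hB hc u1
          have := hmemge c' hc1 hc2
          omega
      · have hy'B : B₁ = y' := by
          by_cases hya : y' ≤ a
          · rw [hB₁, if_pos hya] at hBl ⊢; omega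
          · rw [hB₁, if_neg hya] at hBl ⊢; omega
        rw [push_skip hn hS1 _ (fun _ => Or.inr ⟨hdU, by omega⟩)]
        have h' := hS1
        rw [hy'B] at h'
        exact h'
    -- R neighbour
    set B' : Int := if y' < a then y' else y' + 1 with hB'
    have hS3 : SInv r m a k B'
        (pushNeighbor n m (pushNeighbor n m (pushNeighbor n m s (x₀, y' - 1)) (x₀ - 1, y')) (x₀, y' + 1)) := by
      by_cases hya : y' < a
      · have hdR : distTo r a (x₀, y' + 1) ≤ (k : Int) := by
          simp only [distTo, adI, hx₀]; omega
        rw [hB', if_pos hya]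
        rw [push_skip hn hS2 _ (fun _ => Or.inl hdR)]
        exact hS2
      · have hdR : distTo r a (x₀, y' + 1) = (k : Int) + 1 := by
          simp only [distTo, adI, hx₀]; omega
        rw [hB', if_neg hya]
        refine push_fresh hn hS2 _ hdR (by omega) ?_
        intro c hc ⟨u1, u2⟩
        omega
    -- recurse on the tail
    obtain ⟨vis', heq, hchar⟩ := ih y' B'
      (pushNeighbor n m (pushNeighbor n m (pushNeighbor n m s (x₀, y' - 1)) (x₀ - 1, y')) (x₀, y' + 1))
      (by
        intro y
        constructor
        · intro hy
          exact ⟨((hys y).1 (List.mem_cons_of_mem _ hy)).1, (List.pairwise_cons.1 hsort).1 y hy⟩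
        · rintro ⟨h1, h2⟩
          rcases List.mem_cons.1 ((hys y).2 ⟨h1, by omega⟩) with rfl | hct
          · omega
          · exact hct)
      (List.pairwise_cons.1 hsort).2
      hB'
      hS3
      (fun y hy => hne y (List.mem_cons_of_mem _ hy))
    refine ⟨vis', ?_, hchar⟩
    have hneY : cellVal b x₀ y' ≠ 1 := by
      have := hne y' List.mem_cons_self
      simpa [cellOf, hx₀] using this
    calc levelStep b n m ((y' :: tl).map (cellOf r a k)) s.1 s.2
        = levelStep b n m (tl.map (cellOf r a k))
            (pushNeighbor n m (pushNeighbor n m (pushNeighbor n m s (x₀, y' - 1)) (x₀ - 1, y')) (x₀, y' + 1)).1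
            (pushNeighbor n m (pushNeighbor n m (pushNeighbor n m s (x₀, y' - 1)) (x₀ - 1, y')) (x₀, y' + 1)).2 := by
          simp only [List.map_cons, cellOf, ← hx₀, levelStep, if_neg hneY,
            DIRECTIONS, List.foldl_cons, List.foldl_nil]
          norm_num
          simp only [← sub_eq_add_neg]
      _ = Sum.inr (vis', frontK r m a (k + 1)) := heq

-- ---- the layered reference search ----

def layered (b : List (List Int)) (r m a : Int) : Nat → Nat → Option (Int × Int)
  | _, 0 => none
  | k, fuel + 1 =>
    match (frontK r m a k).find? (fun c => decide (cellVal b c.1 c.2 = 1)) with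
    | some p => some p
    | none => layered b r m a (k + 1) fuel

theorem colOK_empty_succ {r m a : Int} {k : Nat} (hr : 0 ≤ r) (ha : 0 ≤ a ∧ a < m)
    (h : ∀ y, ¬ colOK r m a k y) : ∀ y, ¬ colOK r m a (k + 1) y := by
  intro y hy
  have h1 := h y
  have h2 := h (a - (k : Int))
  have h3 := h (a + (k : Int))
  simp only [colOK, adI] at *
  omega

theorem layered_none_of_empty (b : List (List Int)) (r m a : Int) (hr : 0 ≤ r)
    (ha : 0 ≤ a ∧ a < m) :
    ∀ (fuel k : Nat), (∀ y, ¬ colOK r m a k y) → layered b r m a k fuel = none := by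
  intro fuel
  induction fuel with
  | zero => intro k _; rfl
  | succ fuel ih =>
    intro k h
    have hc : cols r m a k = [] := by
      cases hcs : cols r m a k with
      | nil => rfl
      | cons z t => exact absurd (mem_cols.1 (hcs ▸ List.mem_cons_self)) (h z)
    simp only [layered, frontK, hc, List.map_nil, List.find?_nil]
    exact ih (k + 1) (colOK_empty_succ hr ha h)

theorem bfs_eq_layered (b : List (List Int)) (r m a n : Int)
    (hr : r = (b.length : Int) - 1) (hb : b ≠ []) (hn : n = r + 1) (ha : 0 ≤ a ∧ a < m) :
    ∀ (fuel : Nat) (k : Nat) (vis : (Int × Int) → Bool),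
      (∀ p, vis p = true ↔ (inG r m p ∧ distTo r a p ≤ (k : Int))) →
      bfsLoop b n m fuel (frontK r m a k) vis = (layered b r m a k fuel).getD (-1, -1) := by
  have hr0 : 0 ≤ r := by
    have := List.length_pos_iff.2 hb
    omega
  intro fuel
  induction fuel with
  | zero => intro k vis _; rfl
  | succ fuel ihf =>
    intro k vis hvis
    cases hq : frontK r m a k with
    | nil =>
      have hempty : ∀ y, ¬ colOK r m a k y := by
        intro y hy
        have : cols r m a k = [] := by
          have := congrArg List.length hq
          simp only [frontK, List.length_map, List.length_nil] at this
          exact List.length_eq_zero_iff.1 this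
        rw [← mem_cols (r := r) (m := m) (a := a) (k := k) (y := y)] at hy
        rw [this] at hy
        simp at hy
      rw [layered_none_of_empty b r m a hr0 ha (fuel + 1) k hempty]
      rfl
    | cons hd tlq =>
      have hlay : layered b r m a k (fuel + 1) =
          match (frontK r m a k).find? (fun c => decide (cellVal b c.1 c.2 = 1)) with
          | some p => some p
          | none => layered b r m a (k + 1) fuel := rfl
      cases hf : (frontK r m a k).find? (fun c => decide (cellVal b c.1 c.2 = 1)) with
      | some p =>
        have hls := levelStep_found b n m (frontK r m a k) vis [] p hf
        rw [hq] at hls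
        show (match levelStep b n m (hd :: tlq) vis [] with
          | Sum.inl p => p
          | Sum.inr s => bfsLoop b n m fuel s.2 s.1) = _
        rw [hls, hlay, hf]
        rfl
      | none =>
        have hnone : ∀ c ∈ frontK r m a k, ¬ (cellVal b c.1 c.2 = 1) := by
          intro c hc
          have := List.find?_eq_none.1 hf c hc
          simpa using this
        obtain ⟨vis', heq, hchar⟩ := inner b r m a n k hn hr0 ha (cols r m a k)
          (a - (k : Int) - 2) (a - (k : Int) - 2) (vis, [])
          (by
            intro y
            rw [mem_cols]
            refine ⟨fun h => ⟨h, ?_⟩, fun h => h.1⟩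
            have := h
            simp only [colOK, adI] at this
            omega)
          (pairwise_cols r m a k)
          (by rw [if_pos (by omega)])
          (by
            refine ⟨?_, [], rfl, List.Pairwise.nil, ?_⟩
            · intro p
              rw [hvis p]
              constructor
              · rintro ⟨hin, hle⟩; exact ⟨hin, Or.inl hle⟩
              · rintro ⟨hin, hle | ⟨hde, hy2⟩⟩
                · exact ⟨hin, hle⟩
                · exfalso
                  have hcol : colOK r m a (k + 1) p.2 := inG_dist_colOK hin (by push_cast; omega)
                  simp only [colOK, adI] at hcol
                  omega
            · intro y
              simp only [List.not_mem_nil, false_iff]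
              rintro ⟨hcol, hle⟩
              simp only [colOK, adI] at hcol
              omega)
          (by
            intro y hy
            exact hnone _ (by rw [frontK]; exact List.mem_map_of_mem hy))
        have heq' : levelStep b n m (hd :: tlq) vis [] = Sum.inr (vis', frontK r m a (k + 1)) := by
          rw [← hq]
          exact heq
        show (match levelStep b n m (hd :: tlq) vis [] with
          | Sum.inl p => p
          | Sum.inr s => bfsLoop b n m fuel s.2 s.1) = _
        rw [heq', hlay, hf]
        exact ihf (k + 1) vis' (by
          intro p
          rw [hchar p]
          constructor
          · rintro ⟨hin, hle⟩; exact ⟨hin, by push_cast; omega⟩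
          · rintro ⟨hin, hle⟩; exact ⟨hin, by push_cast at hle; omega⟩)

-- ---- characterization of the best target ----

def Qual (b : List (List Int)) (r m a d : Int) (c : Int × Int) : Prop :=
  inG r m c ∧ cellVal b c.1 c.2 = 1 ∧ distTo r a c < d

def keyLt (r a : Int) (c c' : Int × Int) : Prop :=
  distTo r a c < distTo r a c' ∨ (distTo r a c = distTo r a c' ∧ c.2 < c'.2)

def BestAt (b : List (List Int)) (r m a d : Int) (p : Int × Int) : Prop :=
  Qual b r m a d p ∧ ∀ c, Qual b r m a d c → ¬ keyLt r a c p

theorem best_unique {b : List (List Int)} {r m a d : Int} {p q : Int × Int}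
    (hp : BestAt b r m a d p) (hq : BestAt b r m a d q) : p = q := by
  have h1 := hp.2 q hq.1
  have h2 := hq.2 p hp.1
  simp only [keyLt] at h1 h2
  have hd : distTo r a p = distTo r a q := by omega
  have hy : p.2 = q.2 := by omega
  have : p.1 = q.1 := by
    simp only [distTo] at hd; rw [hy] at hd; omega
  exact Prod.ext_iff.2 ⟨this, hy⟩

theorem find?_min_snd {l : List (Int × Int)} {f : (Int × Int) → Bool} {p : Int × Int}
    (hs : l.Pairwise (fun p q => p.2 < q.2)) (h : l.find? f = some p) :
    ∀ c ∈ l, f c = true → p.2 ≤ c.2 := by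
  induction l with
  | nil => simp at h
  | cons x t ih =>
    intro c hc hfc
    by_cases hx : f x = true
    · rw [List.find?_cons_of_pos hx] at h
      cases h
      rcases List.mem_cons.1 hc with rfl | hct
      · omega
      · have := (List.pairwise_cons.1 hs).1 c hct; omega
    · rw [List.find?_cons_of_neg (by simpa using hx)] at h
      rcases List.mem_cons.1 hc with rfl | hct
      · exact absurd hfc hx
      · exact ih (List.pairwise_cons.1 hs).2 h c hct hfc

theorem layered_best (b : List (List Int)) (r m a d : Int) (hd0 : 0 < d → d.toNat = d) :
    ∀ (fuel k : Nat), ((k : Nat) + fuel = d.toNat) →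
      (∀ c, Qual b r m a d c → (k : Int) ≤ distTo r a c) →
      (∀ p, layered b r m a k fuel = some p → BestAt b r m a d p) ∧
      (layered b r m a k fuel = none → ∀ c, ¬ Qual b r m a d c) := by
  intro fuel
  induction fuel with
  | zero =>
    intro k hk hmin
    constructor
    · intro p hp; exact absurd hp (by simp [layered])
    · intro _ c hc
      have h1 := hmin c hc
      have h2 := hc.2.2
      have h3 := Int.self_le_toNat d
      omega
  | succ fuel ihf =>
    intro k hk hmin
    have hlay : layered b r m a k (fuel + 1) =
        match (frontK r m a k).find? (fun c => decide (cellVal b c.1 c.2 = 1)) with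
        | some p => some p
        | none => layered b r m a (k + 1) fuel := rfl
    have hkd : (k : Int) < d := by
      have h3 := Int.self_le_toNat d
      by_cases hd : 0 < d
      · have h4 := hd0 hd; omega
      · omega
    cases hf : (frontK r m a k).find? (fun c => decide (cellVal b c.1 c.2 = 1)) with
    | some p =>
      constructor
      · intro p' hp'
        rw [hlay, hf] at hp'
        have hpp : p = p' := Option.some.inj hp'
        subst hpp
        have hmem := List.mem_of_find?_eq_some hf
        have hen : cellVal b p.1 p.2 = 1 := by simpa using List.find?_some hf
        obtain ⟨hin, hdk⟩ := mem_frontK.1 hmem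
        refine ⟨⟨hin, hen, by omega⟩, ?_⟩
        intro c hc hlt
        have hcge := hmin c hc
        rcases hlt with hlt | ⟨hde, hy⟩
        · omega
        · have hcf : c ∈ frontK r m a k := mem_frontK.2 ⟨hc.1, by omega⟩
          have := find?_min_snd (frontK_pairwise_snd r m a k) hf c hcf (by simpa using hc.2.1)
          omega
      · intro hnone
        rw [hlay, hf] at hnone
        exact absurd hnone (by simp)
    | none =>
      have hstep : ∀ c, Qual b r m a d c → ((k + 1 : Nat) : Int) ≤ distTo r a c := by
        intro c hc
        have h1 := hmin c hc
        by_cases he : distTo r a c = (k : Int)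
        · exfalso
          have hcf : c ∈ frontK r m a k := mem_frontK.2 ⟨hc.1, he⟩
          have := List.find?_eq_none.1 hf c hcf
          simp only [decide_eq_true_eq] at this
          exact this hc.2.1
        · push_cast; omega
      rw [hlay, hf]
      exact ihf (k + 1) (by omega) hstep

-- ---- the scan computes the same best ----

def scanStep (n archer d : Int) (best : Option (Int × Int × Int)) (t : Int × List Int × Int) :
    Option (Int × Int × Int) :=
  if PySem.List.pyGetD t.2.1 t.2.2 (0 : Int) = 1 then
    let dist := (n - 1 - t.1) + |t.2.2 - archer|
    if dist < d ∧ better dist t.2.2 best = true then some (dist, t.2.2, t.1) else best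
  else best

def cellsList (b : List (List Int)) (m : Int) : List (Int × List Int × Int) :=
  (PySem.List.enumerate b).flatMap (fun xr => (PySem.List.pyRange 0 m 1).map (fun y => (xr.1, xr.2, y)))

theorem foldl_flatMap' {α β γ : Type} (l : List α) (g : α → List β) (f : γ → β → γ) (i : γ) :
    (l.flatMap g).foldl f i = l.foldl (fun acc x => (g x).foldl f acc) i := by
  induction l generalizing i with
  | nil => rfl
  | cons x t ih => simp [List.flatMap_cons, List.foldl_append, ih]

theorem nearestScan_eq_fold (b : List (List Int)) (m archer d : Int) :
    nearestScan b m archer d =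
      ((cellsList b m).foldl (scanStep (b.length : Int) archer d) none).map
        (fun t => (t.2.2, t.2.1)) := by
  simp only [nearestScan, cellsList, foldl_flatMap', List.foldl_map, scanStep]

def ScanInv (b : List (List Int)) (r m a d : Int) (P : (Int × Int) → Prop)
    (st : Option (Int × Int × Int)) : Prop :=
  (st = none → ∀ c, P c → ¬ Qual b r m a d c) ∧
  (∀ dd y x, st = some (dd, y, x) →
    Qual b r m a d (x, y) ∧ dd = distTo r a (x, y) ∧ P (x, y) ∧
    ∀ c, P c → Qual b r m a d c → ¬ keyLt r a c (x, y))

theorem scaninv_iff {b : List (List Int)} {r m a d : Int} {P P' : (Int × Int) → Prop}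
    {st : Option (Int × Int × Int)} (hiff : ∀ c, P c ↔ P' c)
    (h : ScanInv b r m a d P st) : ScanInv b r m a d P' st := by
  obtain ⟨h1, h2⟩ := h
  constructor
  · intro hn c hc; exact h1 hn c ((hiff c).2 hc)
  · intro dd y x hst
    obtain ⟨q1, q2, q3, q4⟩ := h2 dd y x hst
    exact ⟨q1, q2, (hiff _).1 q3, fun c hc => q4 c ((hiff c).2 hc)⟩

-- one scan update preserves the invariant
theorem scan_step_inv {b : List (List Int)} {r m a d n : Int} (hn : n = (b.length : Int))
    (hr : r = n - 1) {P : (Int × Int) → Prop} {st : Option (Int × Int × Int)}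
    (h : ScanInv b r m a d P st) (t : Int × List Int × Int)
    (hwf : 0 ≤ t.1 ∧ t.1 < n ∧ PySem.List.pyGet? b t.1 = some t.2.1 ∧ 0 ≤ t.2.2 ∧ t.2.2 < m) :
    ScanInv b r m a d (fun c => P c ∨ c = (t.1, t.2.2)) (scanStep n a d st t) := by
  obtain ⟨x, row, y⟩ := t
  obtain ⟨w1, w2, w3, w4, w5⟩ := hwf
  simp only at w1 w2 w3 w4 w5 ⊢
  have hcell : cellVal b x y = PySem.List.pyGetD row y 0 := by
    simp only [cellVal, PySem.List.pyGetD, w3, Option.getD_some]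
  have hdist : (n - 1 - x) + |y - a| = distTo r a (x, y) := by
    rw [Int.abs_eq_natAbs]
    simp only [distTo, adI]
    omega
  have hinG : inG r m (x, y) := ⟨w1, by omega, w4, w5⟩
  have hQiff : Qual b r m a d (x, y) ↔
      (PySem.List.pyGetD row y (0 : Int) = 1 ∧ (n - 1 - x) + |y - a| < d) := by
    rw [Qual, hcell, hdist]
    constructor
    · rintro ⟨-, h1, h2⟩; exact ⟨h1, h2⟩
    · rintro ⟨h1, h2⟩; exact ⟨hinG, h1, h2⟩
  simp only [scanStep]
  by_cases h1 : PySem.List.pyGetD row y (0 : Int) = 1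
  · rw [if_pos h1]
    by_cases h2 : (n - 1 - x) + |y - a| < d ∧ better ((n - 1 - x) + |y - a|) y st = true
    · rw [if_pos h2]
      have hQ : Qual b r m a d (x, y) := hQiff.2 ⟨h1, h2.1⟩
      constructor
      · intro hst; exact absurd hst (by simp)
      · intro dd y0 x0 hst
        have hdd : dd = (n - 1 - x) + |y - a| := by
          have := (Option.some.inj hst)
          exact (congrArg (fun q => q.1) this).symm
        have hy0 : y0 = y := by
          have := (Option.some.inj hst)
          exact (congrArg (fun q => q.2.1) this).symm
        have hx0 : x0 = x := by
          have := (Option.some.inj hst)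
          exact (congrArg (fun q => q.2.2) this).symm
        subst hdd hy0 hx0
        refine ⟨hQ, hdist, Or.inr rfl, ?_⟩
        rintro c (hc | rfl) hQc hlt
        · -- an earlier cell cannot beat the new best
          cases hst0 : st with
          | none => exact h.1 hst0 c hc hQc
          | some t0 =>
            obtain ⟨dd0, y0, x0⟩ := t0
            obtain ⟨q1, q2, q3, q4⟩ := h.2 dd0 y0 x0 hst0
            have hbet := h2.2
            rw [hst0] at hbet
            simp only [better, decide_eq_true_eq] at hbet
            apply q4 c hc hQc
            rcases hlt with hlt | ⟨hde, hy⟩ <;>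
              (simp only [keyLt] at *; rw [hdist] at hbet; omega)
        · rcases hlt with hlt | ⟨-, hy⟩ <;> omega
    · rw [if_neg h2]
      -- the new cell does not beat the current best (or is out of range)
      constructor
      · intro hst
        rintro c (hc | rfl)
        · exact h.1 hst c hc
        · intro hQc
          rw [hst] at h2
          simp only [better] at h2
          exact h2 ⟨(hQiff.1 hQc).2, trivial⟩
      · intro dd y0 x0 hst
        obtain ⟨q1, q2, q3, q4⟩ := h.2 dd y0 x0 hst
        refine ⟨q1, q2, Or.inl q3, ?_⟩
        rintro c (hc | rfl) hQc
        · exact q4 c hc hQc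
        · rw [hst] at h2
          simp only [better, decide_eq_true_eq] at h2
          intro hlt
          have hd2 : (n - 1 - x) + |y - a| < d := (hQiff.1 hQc).2
          have h2' : ¬((n - 1 - x) + |y - a| < dd ∨ ((n - 1 - x) + |y - a| = dd ∧ y < y0)) :=
            fun hb => h2 ⟨hd2, hb⟩
          rw [hdist] at h2'
          simp only [keyLt] at hlt
          omega
  · rw [if_neg h1]
    have hnQ : ¬ Qual b r m a d (x, y) := fun hQ => h1 (hQiff.1 hQ).1
    constructor
    · intro hst
      rintro c (hc | rfl)
      · exact h.1 hst c hc
      · exact hnQ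
    · intro dd y0 x0 hst
      obtain ⟨q1, q2, q3, q4⟩ := h.2 dd y0 x0 hst
      refine ⟨q1, q2, Or.inl q3, ?_⟩
      rintro c (hc | rfl) hQc
      · exact q4 c hc hQc
      · exact absurd hQc hnQ

theorem scan_fold_inv {b : List (List Int)} {r m a d n : Int} (hn : n = (b.length : Int))
    (hr : r = n - 1) :
    ∀ (l : List (Int × List Int × Int)) (st : Option (Int × Int × Int)) (P : (Int × Int) → Prop),
      (∀ t ∈ l, 0 ≤ t.1 ∧ t.1 < n ∧ PySem.List.pyGet? b t.1 = some t.2.1 ∧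
        0 ≤ t.2.2 ∧ t.2.2 < m) →
      ScanInv b r m a d P st →
      ScanInv b r m a d (fun c => P c ∨ ∃ t ∈ l, c = (t.1, t.2.2))
        (l.foldl (scanStep n a d) st) := by
  intro l
  induction l with
  | nil =>
    intro st P _ h
    exact scaninv_iff (fun c => by simp) h
  | cons t l ih =>
    intro st P hwf h
    have h1 := scan_step_inv hn hr h t (hwf t List.mem_cons_self)
    have h2 := ih (scanStep n a d st t) _ (fun t' ht' => hwf t' (List.mem_cons_of_mem _ ht')) h1
    refine scaninv_iff (fun c => ?_) h2
    simp only [List.mem_cons]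
    constructor
    · rintro ((hc | rfl) | ⟨t', ht', rfl⟩)
      · exact Or.inl hc
      · exact Or.inr ⟨t, Or.inl rfl, rfl⟩
      · exact Or.inr ⟨t', Or.inr ht', rfl⟩
    · rintro (hc | ⟨t', (rfl | ht'), rfl⟩)
      · exact Or.inl (Or.inl hc)
      · exact Or.inl (Or.inr rfl)
      · exact Or.inr ⟨t', ht', rfl⟩

theorem mem_cellsList_of_inG {b : List (List Int)} {m : Int} {c : Int × Int}
    (hin : inG ((b.length : Int) - 1) m c) :
    ∃ t ∈ cellsList b m, c = (t.1, t.2.2) := by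
  obtain ⟨h1, h2, h3, h4⟩ := hin
  have hk : c.1.toNat < b.length := by omega
  refine ⟨(c.1, b[c.1.toNat], c.2), ?_, by simp⟩
  simp only [cellsList, List.mem_flatMap]
  refine ⟨(c.1, b[c.1.toNat]), ?_, ?_⟩
  · rw [PySem.List.mem_enumerate_iff]
    exact ⟨c.1.toNat, hk, by simp; omega⟩
  · simp only [List.mem_map]
    exact ⟨c.2, PySem.List.mem_pyRange_one.2 ⟨h3, h4⟩, rfl⟩

theorem scan_best (b : List (List Int)) (m archer d : Int) (hm : 0 ≤ m) :
    (nearestScan b m archer d = none →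
      ∀ c, ¬ Qual b ((b.length : Int) - 1) m archer d c) ∧
    (∀ p, nearestScan b m archer d = some p →
      BestAt b ((b.length : Int) - 1) m archer d p) := by
  rw [nearestScan_eq_fold]
  have hwf : ∀ t ∈ cellsList b m, 0 ≤ t.1 ∧ t.1 < (b.length : Int) ∧
      PySem.List.pyGet? b t.1 = some t.2.1 ∧ 0 ≤ t.2.2 ∧ t.2.2 < m := by
    intro t ht
    simp only [cellsList, List.mem_flatMap] at ht
    obtain ⟨xr, hxr, ht⟩ := ht
    rw [PySem.List.mem_enumerate_iff] at hxr
    obtain ⟨j, hj, rfl⟩ := hxr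
    simp only [List.mem_map] at ht
    obtain ⟨y, hy, rfl⟩ := ht
    have hy' := PySem.List.mem_pyRange_one.1 hy
    simp only [zero_add]
    refine ⟨by omega, by omega, ?_, hy'.1, hy'.2⟩
    rw [PySem.List.pyGet?_natCast]
    simp [hj]
  have hbase : ScanInv b ((b.length : Int) - 1) m archer d (fun _ => False) none := by
    constructor
    · intro _ c hc; exact hc.elim
    · intro dd y x h; exact absurd h (by simp)
  have hinv := scan_fold_inv (b := b) (r := (b.length : Int) - 1) (n := (b.length : Int))
    rfl rfl (cellsList b m) none (fun _ => False) hwf hbase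
  cases hsc : (cellsList b m).foldl (scanStep (b.length : Int) archer d) none with
  | none =>
    rw [hsc] at hinv
    constructor
    · intro _ c hQ
      exact (hinv.1 rfl c (Or.inr (mem_cellsList_of_inG hQ.1))) hQ
    · intro p hp; exact absurd hp (by simp)
  | some t =>
    obtain ⟨dd, y, x⟩ := t
    rw [hsc] at hinv
    obtain ⟨q1, q2, q3, q4⟩ := hinv.2 dd y x rfl
    constructor
    · intro hnone; exact absurd hnone (by simp)
    · intro p hp
      simp only [Option.map_some] at hp
      have hpe : p = (x, y) := (Option.some.inj hp).symm
      subst hpe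
      exact ⟨q1, fun c hc => q4 c (Or.inr (mem_cellsList_of_inG hc.1)) hc⟩

-- ---- the two target-finders agree ----

theorem frontK_zero {r m a : Int} (hr : 0 ≤ r) (ha : 0 ≤ a ∧ a < m) :
    frontK r m a 0 = [(r, a)] := by
  have hc : cols r m a 0 = [a] := by
    apply eq_of_pairwise_lt_of_mem_iff (pairwise_cols r m a 0) (by simp)
    intro y
    simp only [mem_cols, colOK, adI, List.mem_singleton]
    omega
  simp [frontK, hc, cellOf, adI]

theorem scan_some_ne {b : List (List Int)} {m archer d : Int} {p : Int × Int} (hm : 0 ≤ m)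
    (h : nearestScan b m archer d = some p) : p ≠ (-1, -1) := by
  have hb := (scan_best b m archer d hm).2 p h
  rcases hb.1.1 with ⟨-, -, h3, -⟩
  intro he
  rw [he] at h3
  simp at h3

theorem nearest_eq (b : List (List Int)) (m archer d : Int) (hb : b ≠ [])
    (hm : m = ((b.headD []).length : Int)) (ha : 0 ≤ archer ∧ archer < m) :
    get_nearest_enemy b archer d =
      (match nearestScan b m archer d with | none => (-1, -1) | some p => p) := by
  have hr0 : (0 : Int) ≤ (b.length : Int) - 1 := by
    have := List.length_pos_iff.2 hb
    omega
  have hL : get_nearest_enemy b archer d =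
      (layered b ((b.length : Int) - 1) m archer 0 d.toNat).getD (-1, -1) := by
    show bfsLoop b (b.length : Int) ((b.headD []).length : Int) d.toNat
        [((b.length : Int) - 1, archer)] (fun p => decide (p = ((b.length : Int) - 1, archer))) = _
    rw [← hm]
    have hfz := frontK_zero (r := (b.length : Int) - 1) (m := m) (a := archer) hr0 ha
    rw [← hfz]
    apply bfs_eq_layered b ((b.length : Int) - 1) m archer (b.length : Int) (by push_cast; ring)
      hb (by ring) ha d.toNat 0
    intro p
    simp only [decide_eq_true_eq, Nat.cast_zero]
    constructor
    · rintro rfl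
      refine ⟨⟨by omega, by omega, ha.1, ha.2⟩, ?_⟩
      simp only [distTo, adI]
      omega
    · rintro ⟨⟨g1, g2, g3, g4⟩, hd⟩
      simp only [distTo, adI] at hd
      have h1 : p.1 = (b.length : Int) - 1 := by omega
      have h2 : p.2 = archer := by omega
      exact Prod.ext_iff.2 ⟨h1, h2⟩
  have hd0 : 0 < d → ((d.toNat : Nat) : Int) = d := fun h => Int.toNat_of_nonneg (le_of_lt h)
  have hlb := layered_best b ((b.length : Int) - 1) m archer d hd0 d.toNat 0 (by simp)
    (fun c hc => by
      obtain ⟨⟨g1, g2, g3, g4⟩, -, -⟩ := hc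
      simp only [distTo, adI]
      omega)
  have hsb := scan_best b m archer d (by omega)
  cases hs : nearestScan b m archer d with
  | none =>
    cases hl : layered b ((b.length : Int) - 1) m archer 0 d.toNat with
    | none => rw [hL, hl]; rfl
    | some p => exact absurd (hlb.1 p hl).1 (hsb.1 hs p)
  | some p =>
    cases hl : layered b ((b.length : Int) - 1) m archer 0 d.toNat with
    | none => exact absurd (hsb.2 p hs).1 (hlb.2 hl p)
    | some q =>
      rw [hL, hl]
      simp only [Option.getD_some]
      exact best_unique (hlb.1 q hl) (hsb.2 p hs)

-- ---- round-level and solve-level assembly ----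

theorem fold_remove_split (l : List (Int × Int)) :
    ∀ (t : List (List Int)) (c r : Int),
      (l.foldl (fun (st : List (List Int) × Int × Int) q =>
        (setZero st.1 q.1 q.2, st.2.1 - 1, st.2.2 + 1)) (t, c, r)) =
      (l.foldl (fun bb (q : Int × Int) => setZero bb q.1 q.2) t, c - l.length, r + l.length) := by
  induction l with
  | nil => intro t c r; simp
  | cons q l ih =>
    intro t c r
    simp only [List.foldl_cons, ih, List.length_cons]
    refine Prod.ext_iff.2 ⟨rfl, Prod.ext_iff.2 ⟨?_, ?_⟩⟩ <;> dsimp only <;> omega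

theorem setZero_head_length (t : List (List Int)) (x y : Int) :
    ((setZero t x y).headD []).length = ((t.headD []).length) := by
  cases t with
  | nil => rfl
  | cons row rest =>
    simp only [setZero, List.zipIdx_cons, List.map_cons, List.headD_cons]
    split <;> simp

theorem fold_setZero_head_length (l : List (Int × Int)) :
    ∀ (t : List (List Int)),
      (((l.foldl (fun bb (q : Int × Int) => setZero bb q.1 q.2) t).headD []).length) =
        ((t.headD []).length) := by
  induction l with
  | nil => intro t; rfl
  | cons q l ih =>
    intro t
    simp only [List.foldl_cons]
    rw [ih (setZero t q.1 q.2), setZero_head_length]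

theorem dropLast_headD (l : List (List Int)) (h : l.dropLast ≠ []) :
    l.dropLast.headD [] = l.headD [] := by
  cases l with
  | nil => simp at h
  | cons x t =>
    cases t with
    | nil => simp at h
    | cons y u => simp [List.dropLast]

theorem rounds_eq (d m : Int) :
    ∀ (tmp : List (List Int)) (curr removed : Int) (i j k : Int),
      (tmp = [] ∨ ((tmp.headD []).length : Int) = m) →
      (0 ≤ i ∧ i < m) → (0 ≤ j ∧ j < m) → (0 ≤ k ∧ k < m) →
      roundsA d [i, j, k] tmp curr removed = roundsB d m (i, j, k) tmp curr removed := by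
  suffices H : ∀ (nn : Nat) (tmp : List (List Int)), tmp.length = nn →
      ∀ (curr removed i j k : Int),
      (tmp = [] ∨ ((tmp.headD []).length : Int) = m) →
      (0 ≤ i ∧ i < m) → (0 ≤ j ∧ j < m) → (0 ≤ k ∧ k < m) →
      roundsA d [i, j, k] tmp curr removed = roundsB d m (i, j, k) tmp curr removed by
    intro tmp curr removed i j k hh hi hj hk
    exact H tmp.length tmp rfl curr removed i j k hh hi hj hk
  intro nn
  induction nn using Nat.strong_induction_on with
  | _ nn ih =>
    intro tmp hlen curr removed i j k hhead hi hj hk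
    rw [roundsA, roundsB]
    by_cases hcond : 0 < curr ∧ tmp ≠ []
    · rw [dif_pos hcond, dif_pos hcond]
      have hmv : ((tmp.headD []).length : Int) = m := by
        rcases hhead with rfl | h
        · exact absurd rfl hcond.2
        · exact h
      have hTeq :
          ([i, j, k].foldl (fun s archer =>
            let pos := get_nearest_enemy tmp archer d
            if pos ≠ (-1, -1) then PySem.Set.add s pos else s) PySem.Set.empty) =
          ([i, j, k].foldl (fun s a =>
            match nearestScan tmp m a d with
            | some t => PySem.Set.add s t
            | none => s) PySem.Set.empty) := by
        apply PySem.List.foldl_congr_mem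
        intro s archer hmem
        have harch : 0 ≤ archer ∧ archer < m := by
          simp only [List.mem_cons, List.not_mem_nil, or_false] at hmem
          rcases hmem with rfl | rfl | rfl <;> assumption
        simp only
        rw [nearest_eq tmp m archer d hcond.2 hmv.symm harch]
        cases hsc : nearestScan tmp m archer d with
        | none => simp
        | some t =>
          rw [if_pos]
          simp only [ne_eq]
          intro he
          exact scan_some_ne (by omega) hsc (by simpa using he)
      rw [hTeq]
      simp only [fold_remove_split]
      apply ih (nn - 1) (by
        cases tmp with
        | nil => exact absurd rfl hcond.2
        | cons _ _ => simp at hlen; omega)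
      · rw [List.length_dropLast, length_foldl_setZero, hlen]
      · by_cases hne' : (([i, j, k].foldl (fun s a =>
            match nearestScan tmp m a d with
            | some t => PySem.Set.add s t
            | none => s) PySem.Set.empty).foldl
              (fun bb (q : Int × Int) => setZero bb q.1 q.2) tmp).dropLast = []
        · exact Or.inl hne'
        · right
          rw [dropLast_headD _ hne', fold_setZero_head_length]
          exact hmv
      · exact hi
      · exact hj
      · exact hk
    · rw [dif_neg hcond, dif_neg hcond]

theorem comb2_eq (m : Int) :
    ∀ (lo : Int), PySem.List.combinations (PySem.List.pyRange lo m 1) 2 =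
      (PySem.List.pyRange lo m 1).flatMap (fun j =>
        (PySem.List.pyRange (j + 1) m 1).map (fun k => [j, k])) := by
  suffices H : ∀ (fuel : Nat) (lo : Int), (m - lo).toNat ≤ fuel →
      PySem.List.combinations (PySem.List.pyRange lo m 1) 2 =
      (PySem.List.pyRange lo m 1).flatMap (fun j =>
        (PySem.List.pyRange (j + 1) m 1).map (fun k => [j, k])) by
    intro lo; exact H (m - lo).toNat lo le_rfl
  intro fuel
  induction fuel with
  | zero =>
    intro lo h
    rw [PySem.List.pyRange_one_eq_nil (by omega)]
    simp [PySem.List.combinations_nil_succ]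
  | succ fuel ih =>
    intro lo h
    by_cases hlo : lo < m
    · rw [PySem.List.pyRange_one_cons hlo, PySem.List.combinations_cons_succ,
        PySem.List.combinations_one, ih (lo + 1) (by omega), List.flatMap_cons]
      simp [List.map_map, Function.comp]
    · rw [PySem.List.pyRange_one_eq_nil (by omega)]
      simp [PySem.List.combinations_nil_succ]

theorem comb3_eq (m : Int) :
    ∀ (lo : Int), PySem.List.combinations (PySem.List.pyRange lo m 1) 3 =
      (PySem.List.pyRange lo m 1).flatMap (fun i =>
        (PySem.List.pyRange (i + 1) m 1).flatMap (fun j =>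
          (PySem.List.pyRange (j + 1) m 1).map (fun k => [i, j, k]))) := by
  suffices H : ∀ (fuel : Nat) (lo : Int), (m - lo).toNat ≤ fuel →
      PySem.List.combinations (PySem.List.pyRange lo m 1) 3 =
      (PySem.List.pyRange lo m 1).flatMap (fun i =>
        (PySem.List.pyRange (i + 1) m 1).flatMap (fun j =>
          (PySem.List.pyRange (j + 1) m 1).map (fun k => [i, j, k]))) by
    intro lo; exact H (m - lo).toNat lo le_rfl
  intro fuel
  induction fuel with
  | zero =>
    intro lo h
    rw [PySem.List.pyRange_one_eq_nil (by omega)]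
    simp [PySem.List.combinations_nil_succ]
  | succ fuel ih =>
    intro lo h
    by_cases hlo : lo < m
    · rw [PySem.List.pyRange_one_cons hlo, PySem.List.combinations_cons_succ,
        comb2_eq m (lo + 1), ih (lo + 1) (by omega), List.flatMap_cons]
      simp [List.map_flatMap, List.map_map, Function.comp_def]
    · rw [PySem.List.pyRange_one_eq_nil (by omega)]
      simp [PySem.List.combinations_nil_succ]

theorem solve_eq (d : Int) (board : List (List Int)) (hb : board ≠ []) :
    solve d board = solve_alt d board := by
  show (PySem.List.combinations (PySem.List.pyRange 0 ((board.headD []).length : Int) 1) 3).foldl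
      (fun mx comb => max mx (roundsA d comb (board.map (fun row => row))
        ((board.map (fun row => row.sum)).sum) 0)) 0 = _
  rw [comb3_eq, foldl_flatMap']
  apply PySem.List.foldl_congr_mem
  intro acc i hi
  rw [foldl_flatMap']
  apply PySem.List.foldl_congr_mem
  intro acc2 j hj
  rw [List.foldl_map]
  apply PySem.List.foldl_congr_mem
  intro acc3 k hk
  have hi' := PySem.List.mem_pyRange_one.1 hi
  have hj' := PySem.List.mem_pyRange_one.1 hj
  have hk' := PySem.List.mem_pyRange_one.1 hk
  have hhead : board.map (fun row => row) = [] ∨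
      (((board.map (fun row => row)).headD []).length : Int) = ((board.headD []).length : Int) := by
    right
    cases board with
    | nil => rfl
    | cons r t => rfl
  rw [rounds_eq d ((board.headD []).length : Int) (board.map (fun row => row))
    ((board.map (fun row => row.sum)).sum) 0 i j k hhead
    ⟨hi'.1, hi'.2⟩ ⟨by omega, hj'.2⟩ ⟨by omega, hk'.2⟩]

-- ===== VERDICT (by name: the statement is the Claim_ definition above) =====
theorem solve_spec : Claim_equal_solve := by
  intro d board _ hpre
  show solve d board = solve_alt d board
  exact solve_eq d board hpre.1
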